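-- pv_equiv track=rewrite | github.com/Victor-Gabriel-Barbosa/ED2 | beecrowd/huffman.py | calculate_min_frequencies
-- ===== SOURCE A (Python) =====
-- def calculate_min_frequencies(N, lengths):
--     """
--     Calculate minimum frequencies that could generate given Huffman code lengths.
--     """
--     # Ordena os comprimentos em ordem decrescente
--     lengths.sort(reverse=True)
--
--     # Inicializa as frequências
--     freqs = [1] * N
--
--     # Para cada posição i
--     for i in range(N-1):
--         # Soma todas as frequências até i+1
--         sum_freq = sum(freqs[:i+1])
--
--         # Se a próxima frequência é menor que a soma até agora
--         # precisamos ajustar para manter a propriedade de Huffman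
--         if freqs[i+1] < sum_freq:
--             freqs[i+1] = sum_freq
--
--     return sum(freqs)
-- ===== SOURCE B (Python) =====
-- def calculate_min_frequencies(N, lengths):
--     """
--     Calculate minimum frequencies that could generate given Huffman code lengths.
--
--     The minimal frequencies forced by the Huffman property are 1, 1, 2, 4, ...,
--     2^(N-2), whose total is 2^(N-1); `lengths` never affects the result.
--     """
--     return 2 ** (N - 1) if N >= 1 else 0
-- ===== Notes on version B (the rewrite author's own statement) =====
-- stated objective: faster
-- what changed: A sorts lengths and runs a quadratic loop re-summing a growing prefix, but its result depends only on N and equals 2^(N-1) (0 for N<1); B returns that closed form directly.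
import Mathlib
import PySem

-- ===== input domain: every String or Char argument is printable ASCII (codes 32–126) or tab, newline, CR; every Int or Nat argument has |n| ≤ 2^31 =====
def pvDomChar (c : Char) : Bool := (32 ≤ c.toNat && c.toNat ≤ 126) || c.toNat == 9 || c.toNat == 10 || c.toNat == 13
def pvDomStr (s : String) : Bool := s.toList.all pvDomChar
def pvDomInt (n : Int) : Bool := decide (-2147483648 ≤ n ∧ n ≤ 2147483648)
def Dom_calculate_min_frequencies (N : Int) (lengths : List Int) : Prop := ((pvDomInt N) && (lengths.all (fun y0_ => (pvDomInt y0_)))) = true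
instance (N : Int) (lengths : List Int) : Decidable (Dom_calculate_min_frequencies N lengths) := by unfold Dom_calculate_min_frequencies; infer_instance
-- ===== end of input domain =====

-- B replaces A's quadratic prefix-resumming loop (whose result depends only on N) by the
-- closed form 2^(N-1) for N ≥ 1, 0 otherwise; faster. Equivalence is about the RETURN
-- value only: A sorts `lengths` in place (the sorted list is never read), B does not.

-- ===== PORT A =====
def calculate_min_frequencies (N : Int) (lengths : List Int) : Int :=
  -- lengths.sort(reverse=True): in-place mutation; its value is never read afterwards
  let _sorted := PySem.List.sorted lengths (fun x => x) true
  -- freqs = [1] * N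
  let freqs : List Int := List.replicate N.toNat 1
  -- for i in range(N-1): sum_freq = sum(freqs[:i+1]); if freqs[i+1] < sum_freq: freqs[i+1] = sum_freq
  let freqs := (PySem.List.pyRange 0 (N - 1) 1).foldl
    (fun fs i =>
      if PySem.List.pyGetD fs (i + 1) 0 < (PySem.List.slice fs none (some (i + 1))).sum then
        PySem.List.pySetD fs (i + 1) (PySem.List.slice fs none (some (i + 1))).sum
      else fs)
    freqs
  freqs.sum

-- ===== PORT B =====
def calculate_min_frequencies_alt (N : Int) (lengths : List Int) : Int :=
  if N ≥ 1 then 2 ^ (N - 1).toNat else 0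

-- ===== PRECONDITION & SPEC =====
def Spec_calculate_min_frequencies (N : Int) (lengths : List Int) (out : Int) : Prop := out = calculate_min_frequencies_alt N lengths
instance (N : Int) (lengths : List Int) (out : Int) : Decidable (Spec_calculate_min_frequencies N lengths out) := by unfold Spec_calculate_min_frequencies; infer_instance

-- ===== CLAIM (what is proved, stated in full; the proofs are below) =====
def Claim_equal_calculate_min_frequencies : Prop := ∀ (N : Int) (lengths : List Int), Dom_calculate_min_frequencies N lengths → Spec_calculate_min_frequencies N lengths (calculate_min_frequencies N lengths)

-- ===== LEMMAS AND PROOFS =====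

-- A's loop body, as a function of the current freqs and the loop index.
def pvBody (fs : List Int) (i : Int) : List Int :=
  if PySem.List.pyGetD fs (i + 1) 0 < (PySem.List.slice fs none (some (i + 1))).sum then
    PySem.List.pySetD fs (i + 1) (PySem.List.slice fs none (some (i + 1))).sum
  else fs

-- freqs after k iterations of A's loop (1 ≤ n, k ≤ n-1): [1, 2^0, 2^1, …, 2^(k-1), 1, 1, …]
def pvState (n k : Nat) : List Int :=
  1 :: (List.range k).map (fun j => (2 : Int) ^ j) ++ List.replicate (n - 1 - k) 1

theorem pv_sum_pows (k : Nat) :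
    (((List.range k).map (fun j => (2 : Int) ^ j)).sum) = 2 ^ k - 1 := by
  induction k with
  | zero => simp
  | succ k ih => rw [List.range_succ]; simp [ih]; ring

theorem pv_body_state (n k : Nat) (hk : k + 1 ≤ n - 1) :
    pvBody (pvState n k) (k : Int) = pvState n (k + 1) := by
  have hcast : ((k : Int) + 1) = ((k + 1 : Nat) : Int) := by push_cast; ring
  have hsplit : pvState n k
      = (1 :: (List.range k).map (fun j => (2 : Int) ^ j)) ++ 1 :: List.replicate (n - 1 - (k + 1)) 1 := by
    rw [pvState]
    conv_lhs => rw [show n - 1 - k = (n - 1 - (k + 1)) + 1 from by omega, List.replicate_succ]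
  have hlen : (1 :: (List.range k).map (fun j => (2 : Int) ^ j)).length = k + 1 := by simp
  have hsum : (PySem.List.slice (pvState n k) none (some ((k : Int) + 1))).sum = 2 ^ k := by
    rw [hcast, PySem.List.slice_to_natCast, hsplit, List.take_left' hlen, List.sum_cons, pv_sum_pows]
    ring
  have hget : PySem.List.pyGetD (pvState n k) ((k : Int) + 1) 0 = 1 := by
    rw [hcast, PySem.List.pyGetD_natCast, hsplit, List.getD_eq_getElem?_getD,
        List.getElem?_append_right (by simp)]
    simp
  rw [pvBody, hsum, hget]
  by_cases hk0 : k = 0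
  · subst hk0
    rw [if_neg (by norm_num)]
    rw [pvState, pvState]
    conv_lhs => rw [show n - 1 - 0 = (n - 1 - 1) + 1 from by omega, List.replicate_succ]
    simp [List.range_succ]
  · rw [if_pos (by
      calc (1 : Int) < 2 ^ 1 := by norm_num
        _ ≤ 2 ^ k := pow_le_pow_right₀ (by norm_num) (by omega))]
    rw [hcast, PySem.List.pySetD_natCast, hsplit, List.set_append_right _ _ (hlen.le)]
    rw [hlen, Nat.sub_self]
    simp [pvState, List.range_succ]

theorem pv_loop_inv (n k : Nat) (hn : 1 ≤ n) (hk : k ≤ n - 1) :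
    (List.range k).foldl (fun fs (j : Nat) => pvBody fs (j : Int)) (List.replicate n 1)
      = pvState n k := by
  induction k with
  | zero =>
    show List.replicate n 1 = pvState n 0
    rw [pvState]
    conv_lhs => rw [show n = (n - 1 - 0) + 1 from by omega, List.replicate_succ]
    simp
  | succ k ih =>
    rw [List.range_succ, List.foldl_append, ih (by omega), List.foldl_cons, List.foldl_nil]
    exact pv_body_state n k hk

theorem pv_sum_state (n : Nat) : (pvState n (n - 1)).sum = 2 ^ (n - 1) := by
  rw [pvState, Nat.sub_self, List.replicate_zero, List.append_nil, List.sum_cons, pv_sum_pows]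
  ring

-- ===== VERDICT (by name: the statement is the Claim_ definition above) =====
theorem calculate_min_frequencies_spec : Claim_equal_calculate_min_frequencies := by
  intro N lengths _
  unfold Spec_calculate_min_frequencies
  by_cases hN : N ≥ 1
  · simp only [calculate_min_frequencies]
    rw [show (fun (fs : List Int) (i : Int) =>
        if PySem.List.pyGetD fs (i + 1) 0 < (PySem.List.slice fs none (some (i + 1))).sum then
          PySem.List.pySetD fs (i + 1) (PySem.List.slice fs none (some (i + 1))).sum
        else fs) = pvBody from rfl]
    rw [PySem.List.pyRange_zero, List.foldl_map]
    rw [show (N - 1).toNat = N.toNat - 1 from by omega]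
    rw [pv_loop_inv N.toNat (N.toNat - 1) (by omega) le_rfl]
    rw [pv_sum_state N.toNat]
    simp [calculate_min_frequencies_alt, hN, show (N - 1).toNat = N.toNat - 1 from by omega]
  · have h1 : N.toNat = 0 := by omega
    have h2 : PySem.List.pyRange 0 (N - 1) 1 = [] := PySem.List.pyRange_one_eq_nil (by omega)
    simp [calculate_min_frequencies, calculate_min_frequencies_alt, h1, h2, hN]
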